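-- pv_equiv track=rewrite | github.com/UCLA-VAST/Odyssey | lower_bound/lb.py | get_padded_candidates
-- ===== SOURCE A (Python) =====
-- from math import log2, ceil
--
-- def get_padded_candidates(n):
-- 	candidates = [x for x in range(1,n)]
-- 	padded_sizes = []
-- 	for i in candidates:
-- 		padded_size = ceil(n/i)*i
-- 		padded_sizes.append(padded_size)
-- 	padded_sizes = list(set(padded_sizes))
-- 	# sort
-- 	padded_sizes.sort()
-- 	return padded_sizes
-- ===== SOURCE B (Python) =====
-- def get_padded_candidates(n):
--     # Every padded size lies in [n, 2n); m belongs iff it has a divisor i with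
--     # m - n < i < n.  For m > n such an i corresponds exactly to the complementary
--     # divisor d = m // i in the narrow interval 2 <= d <= (m-1)//(m-n), so scan that.
--     # Scanning m in ascending order yields the result already distinct and sorted.
--     result = []
--     for m in range(n, 2 * n):
--         k = m - n
--         if k == 0:
--             if n > 1:
--                 result.append(m)
--             continue
--         for d in range(2, (m - 1) // k + 1):
--             if m % d == 0:
--                 result.append(m)
--                 break
--     return result
-- ===== Notes on version B (the rewrite author's own statement) =====
-- stated objective: alternative
-- what changed: Instead of computing ceil(n/i)*i for every i then deduplicating and sorting, B scans each candidate value m in [n, 2n) in ascending order and keeps m iff it has a divisor i with m-n < i < n (found via the complementary divisor d = m//i in the narrow interval [2, (m-1)//(m-n)]), so the output is produced already distinct and sorted with no set or sort.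
import Mathlib
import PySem

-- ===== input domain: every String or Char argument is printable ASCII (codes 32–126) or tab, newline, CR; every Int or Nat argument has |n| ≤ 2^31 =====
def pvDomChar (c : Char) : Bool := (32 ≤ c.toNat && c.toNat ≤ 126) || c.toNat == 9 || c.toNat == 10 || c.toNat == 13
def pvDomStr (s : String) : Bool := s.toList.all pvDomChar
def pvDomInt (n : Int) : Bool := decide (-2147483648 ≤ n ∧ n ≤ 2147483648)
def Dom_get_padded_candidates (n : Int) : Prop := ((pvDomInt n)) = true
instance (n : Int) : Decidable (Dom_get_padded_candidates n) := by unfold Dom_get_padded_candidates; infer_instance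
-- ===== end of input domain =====

-- B replaces A's "map ceil(n/i)*i over i, dedup, sort" by a single ascending scan of
-- m ∈ [n, 2n) keeping the m that have a divisor i with m-n < i < n (alternative decomposition).

-- ===== PORT A =====
-- ceil(n/i) is ported as the exact integer ceiling -((-n)//i); on Dom (|n| ≤ 2^31) the
-- float division inside Python's ceil(n/i) is exact for this purpose, so this is exact there.
def get_padded_candidates (n : Int) : List Int :=
  let candidates := PySem.List.pyRange 1 n 1
  let padded_sizes :=
    candidates.foldl (fun acc i => acc ++ [(-(PySem.Int.floordiv (-n) i)) * i]) []
  PySem.List.sorted (PySem.Set.ofList padded_sizes) (fun x => x) false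

-- ===== PORT B =====
def get_padded_candidates_alt (n : Int) : List Int :=
  (PySem.List.pyRange n (2 * n) 1).foldl
    (fun result m =>
      if (if m - n = 0 then decide (1 < n)
          else (PySem.List.pyRange 2 (PySem.Int.floordiv (m - 1) (m - n) + 1) 1).any
                 (fun d => PySem.Int.mod m d == 0))
      then result ++ [m] else result) []

-- ===== PRECONDITION & SPEC =====
def Spec_get_padded_candidates (n : Int) (out : List Int) : Prop := out = get_padded_candidates_alt n
instance (n : Int) (out : List Int) : Decidable (Spec_get_padded_candidates n out) := by unfold Spec_get_padded_candidates; infer_instance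

-- ===== CLAIM (what is proved, stated in full; the proofs are below) =====
def Claim_equal_get_padded_candidates : Prop := ∀ (n : Int), Dom_get_padded_candidates n → Spec_get_padded_candidates n (get_padded_candidates n)

-- ===== LEMMAS AND PROOFS =====

-- B's test on m (under n ≤ m < 2n), as a proposition: m has a divisor i with m - n < i < n.
lemma alt_test_iff (n m : Int) (hlb : n ≤ m) (hub : m < 2 * n) :
    ((if m - n = 0 then decide (1 < n)
      else (PySem.List.pyRange 2 (PySem.Int.floordiv (m - 1) (m - n) + 1) 1).any
             (fun d => PySem.Int.mod m d == 0)) = true)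
      ↔ ∃ i : Int, 1 ≤ i ∧ m - n < i ∧ i < n ∧ i ∣ m := by
  by_cases hk : m - n = 0
  · rw [if_pos hk, decide_eq_true_eq]
    constructor
    · intro h1
      exact ⟨1, le_refl 1, by omega, h1, one_dvd m⟩
    · rintro ⟨i, h1, h2, h3, -⟩; omega
  · have hkpos : 0 < m - n := by omega
    have hn2 : 2 ≤ n := by omega
    rw [if_neg hk]
    simp only [List.any_eq_true, PySem.List.mem_pyRange_one, beq_iff_eq,
      PySem.Int.mod_eq_zero_iff_dvd]
    constructor
    · rintro ⟨d, ⟨hd2, hdlt⟩, c, hc⟩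
      -- d is a divisor with 2 ≤ d and d * (m - n) ≤ m - 1; i := c = m / d works
      have hdub : d * (m - n) ≤ m - 1 := by
        rw [← PySem.Int.le_floordiv_iff_mul_le hkpos]; omega
      have hcpos : 0 < c := by nlinarith
      refine ⟨c, by omega, ?_, ?_, d, by rw [hc]; ring⟩
      · nlinarith
      · nlinarith
    · rintro ⟨i, h1, h2, h3, c, hc⟩
      -- the complementary divisor d := c = m / i lies in [2, (m-1)//(m-n)]
      have hcpos : 0 < c := by nlinarith
      have hc2 : 2 ≤ c := by nlinarith
      refine ⟨c, ⟨hc2, ?_⟩, i, by rw [hc]; ring⟩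
      have : c * (m - n) ≤ m - 1 := by nlinarith
      rw [show PySem.Int.floordiv (m - 1) (m - n) + 1
            = PySem.Int.floordiv (m - 1) (m - n) + 1 from rfl]
      have := (PySem.Int.le_floordiv_iff_mul_le hkpos (q := c) (a := m - 1)).mpr this
      omega

-- Membership characterisation shared by both sides.
lemma mem_characterisation (n m : Int) :
    (∃ i : Int, 1 ≤ i ∧ i < n ∧ (-(PySem.Int.floordiv (-n) i)) * i = m)
      ↔ (n ≤ m ∧ m < 2 * n) ∧ ∃ i : Int, 1 ≤ i ∧ m - n < i ∧ i < n ∧ i ∣ m := by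
  constructor
  · rintro ⟨i, h1, h2, hm⟩
    have hi : (0:Int) < i := by omega
    have hq := (PySem.Int.neg_floordiv_neg_eq_iff_of_pos (a := n) (b := i)
      (q := -(PySem.Int.floordiv (-n) i)) hi).mp rfl
    -- hq : (q - 1) * i < n ∧ n ≤ q * i  with q * i = m
    have hub : m < n + i := by nlinarith [hq.1, hm]
    have hlb : n ≤ m := by rw [← hm]; exact hq.2
    exact ⟨⟨hlb, by omega⟩, i, h1, by omega, h2, ⟨-(PySem.Int.floordiv (-n) i), by
      rw [← hm]; ring⟩⟩
  · rintro ⟨⟨hlb, _⟩, i, h1, h2, h3, q, hq⟩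
    have hi : (0:Int) < i := by omega
    refine ⟨i, h1, h3, ?_⟩
    have : -(PySem.Int.floordiv (-n) i) = q := by
      rw [PySem.Int.neg_floordiv_neg_eq_iff_of_pos hi]
      constructor
      · nlinarith [hq, h2]
      · nlinarith [hq, hlb]
    rw [this, mul_comm, ← hq]

-- ===== VERDICT (by name: the statement is the Claim_ definition above) =====
theorem get_padded_candidates_spec : Claim_equal_get_padded_candidates := by
  intro n _
  show get_padded_candidates n = get_padded_candidates_alt n
  unfold get_padded_candidates get_padded_candidates_alt
  dsimp only
  rw [PySem.List.foldl_append_singleton_eq_map, PySem.List.foldl_append_if_eq_filter]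
  simp only [List.nil_append]
  apply PySem.List.sorted_eq_of_perm_of_pairwise_lt
  · -- the filtered range is a permutation of the dedup'd map
    refine (List.perm_ext_iff_of_nodup (List.Nodup.filter _
        (PySem.List.nodup_pyRange_one _ _)) (PySem.Set.nodup_ofList _)).mpr ?_
    intro m
    simp only [List.mem_filter, PySem.Set.mem_ofList, List.mem_map,
      PySem.List.mem_pyRange_one]
    constructor
    · rintro ⟨⟨hlb, hub⟩, ht⟩
      obtain ⟨i, h1, h2, hm⟩ := (mem_characterisation n m).mpr
        ⟨⟨hlb, hub⟩, (alt_test_iff n m hlb hub).mp ht⟩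
      exact ⟨i, ⟨h1, h2⟩, hm⟩
    · rintro ⟨a, ⟨h1, h2⟩, hm⟩
      have h := (mem_characterisation n m).mp ⟨a, h1, h2, hm⟩
      exact ⟨h.1, (alt_test_iff n m h.1.1 h.1.2).mpr h.2⟩
  · -- the filtered range is strictly increasing
    exact List.Pairwise.filter _ (PySem.List.pairwise_lt_pyRange_one _ _)
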